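-- pv_equiv track=rewrite | github.com/AlexanderDLe/Python_DataStructuresAndAlgorithms | Amazon/_OACalculateGreyness.py | calculateGreyness
-- ===== SOURCE A (Python) =====
-- def calculateGreyness(pixels):
--   rows = len(pixels)
--   cols = len(pixels[0])
--
--   totalPossibleOnes = rows + cols - 1
--   maxOnesInRows = 0
--   maxOnesInCols = 0
--   maxRow = 0
--   maxCol = 0
--
--   # Assuming nxn matrix, we can iterate n*m once, otherwise iterate twice
--   for row in range(rows):
--     currOnesInRow = 0
--     for col in range(cols):
--       currOnesInRow += pixels[row][col]
--
--     if currOnesInRow > maxOnesInRows: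
--       maxOnesInRows = currOnesInRow
--       maxRow = row
--
--   for col in range(cols):
--     currOnesInCol = 0
--     for row in range(rows):
--       currOnesInCol += pixels[row][col]
--
--     if currOnesInCol > maxOnesInCols:
--       maxOnesInCols = currOnesInCol
--       maxCol = col
--
--
--   totalOnes = maxOnesInRows + maxOnesInCols - pixels[maxRow][maxCol]
--   totalZeroes = totalPossibleOnes - totalOnes
--
--   return totalOnes - totalZeroes
-- ===== SOURCE B (Python) =====
-- def calculateGreyness(pixels):
--     rows = len(pixels)
--     cols = len(pixels[0])
--
--     # one traversal: row sums and a column-sum table together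
--     colSums = [0] * cols
--     maxOnesInRows = 0
--     maxRow = 0
--     for row in range(rows):
--         curr = 0
--         r = pixels[row]
--         for col in range(cols):
--             v = r[col]
--             curr += v
--             colSums[col] += v
--         if curr > maxOnesInRows:
--             maxOnesInRows = curr
--             maxRow = row
--
--     maxOnesInCols = 0
--     maxCol = 0
--     for col in range(cols):
--         if colSums[col] > maxOnesInCols:
--             maxOnesInCols = colSums[col]
--             maxCol = col
--
--     totalOnes = maxOnesInRows + maxOnesInCols - pixels[maxRow][maxCol]
--     return totalOnes - (rows + cols - 1 - totalOnes)
-- ===== Notes on version B (the rewrite author's own statement) =====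
-- stated objective: alternative
-- what changed: Replaces A's second double loop (a full re-traversal per column) with a column-sum table built during a single traversal of the matrix; the column maximum is then read off the table in one linear scan.
import Mathlib
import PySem

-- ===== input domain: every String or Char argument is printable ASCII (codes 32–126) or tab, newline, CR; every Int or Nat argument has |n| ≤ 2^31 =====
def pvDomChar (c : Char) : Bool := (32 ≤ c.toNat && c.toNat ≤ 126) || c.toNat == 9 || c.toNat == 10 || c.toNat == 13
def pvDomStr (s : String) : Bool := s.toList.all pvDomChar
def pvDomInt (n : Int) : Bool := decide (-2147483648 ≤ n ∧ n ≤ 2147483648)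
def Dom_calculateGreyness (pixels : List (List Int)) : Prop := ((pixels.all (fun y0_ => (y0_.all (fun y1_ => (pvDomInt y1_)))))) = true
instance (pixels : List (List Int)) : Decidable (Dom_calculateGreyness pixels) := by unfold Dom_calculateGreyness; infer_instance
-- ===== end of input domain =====

-- B replaces A's second double loop by a column-sum table filled during one traversal; return value only, same result.

-- ===== PORT A =====
-- pixels[row][col]: row/col are nonnegative range indices, in range under Pre_; 'getD _ 0' stands for the Python indexing there.
def calculateGreyness (pixels : List (List Int)) : Int :=
  let rows := pixels.length
  let cols := (pixels.getD 0 []).length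
  let rmax := (List.range rows).foldl (fun (st : Int × Nat) row =>
      let curr := (List.range cols).foldl (fun acc col => acc + (pixels.getD row []).getD col 0) 0
      if curr > st.1 then (curr, row) else st) (0, 0)
  let cmax := (List.range cols).foldl (fun (st : Int × Nat) col =>
      let curr := (List.range rows).foldl (fun acc row => acc + (pixels.getD row []).getD col 0) 0
      if curr > st.1 then (curr, col) else st) (0, 0)
  let totalPossibleOnes : Int := (rows : Int) + (cols : Int) - 1
  let totalOnes := rmax.1 + cmax.1 - (pixels.getD rmax.2 []).getD cmax.2 0
  let totalZeroes := totalPossibleOnes - totalOnes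
  totalOnes - totalZeroes

-- ===== PORT B =====
def calculateGreyness_alt (pixels : List (List Int)) : Int :=
  let rows := pixels.length
  let cols := (pixels.getD 0 []).length
  -- one traversal: state = (colSums, maxOnesInRows, maxRow)
  let s := (List.range rows).foldl (fun (st : List Int × Int × Nat) row =>
      let r := pixels.getD row []
      let p := (List.range cols).foldl (fun (p : List Int × Int) col =>
          (p.1.set col (p.1.getD col 0 + r.getD col 0), p.2 + r.getD col 0)) (st.1, 0)
      if p.2 > st.2.1 then (p.1, p.2, row) else (p.1, st.2.1, st.2.2))
    (List.replicate cols 0, 0, 0)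
  let cmax := (List.range cols).foldl (fun (st : Int × Nat) col =>
      if s.1.getD col 0 > st.1 then (s.1.getD col 0, col) else st) (0, 0)
  let totalOnes := s.2.1 + cmax.1 - (pixels.getD s.2.2 []).getD cmax.2 0
  totalOnes - ((rows : Int) + (cols : Int) - 1 - totalOnes)

-- ===== PRECONDITION & SPEC =====
-- Pre_ excludes exactly the inputs where Python raises IndexError: an empty matrix (pixels[0]),
-- an empty first row (the final pixels[maxRow][maxCol] indexes pixels[0][0] into an empty row),
-- and a row shorter than the first row (pixels[row][col] for col < len(pixels[0])).
def Pre_calculateGreyness (pixels : List (List Int)) : Prop :=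
  pixels ≠ [] ∧ (pixels.getD 0 []) ≠ [] ∧ ∀ r ∈ pixels, (pixels.getD 0 []).length ≤ r.length
instance (pixels : List (List Int)) : Decidable (Pre_calculateGreyness pixels) := by
  unfold Pre_calculateGreyness; infer_instance
def pvWitness_calculateGreyness : List (List Int) := [[1, 0], [0, 1]]

def Spec_calculateGreyness (pixels : List (List Int)) (out : Int) : Prop := out = calculateGreyness_alt pixels
instance (pixels : List (List Int)) (out : Int) : Decidable (Spec_calculateGreyness pixels out) := by unfold Spec_calculateGreyness; infer_instance

-- ===== CLAIM (what is proved, stated in full; the proofs are below) =====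
def Claim_equal_calculateGreyness : Prop := ∀ (pixels : List (List Int)), Dom_calculateGreyness pixels → Pre_calculateGreyness pixels → Spec_calculateGreyness pixels (calculateGreyness pixels)

-- ===== LEMMAS AND PROOFS =====

-- shifting the accumulator out of a sum fold
theorem pv_foldl_add_shift (f : Nat → Int) (cs : List Nat) (a : Int) :
    cs.foldl (fun s c => s + f c) a = a + cs.foldl (fun s c => s + f c) 0 := by
  induction cs generalizing a with
  | nil => simp
  | cons x cs ih =>
    simp only [List.foldl_cons]
    rw [ih (a + f x), ih (0 + f x)]
    ring

-- the column-sum update done by one row of B's traversal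
def pvUpd (f : Nat → Int) (cs : List Nat) (l : List Int) : List Int :=
  cs.foldl (fun l col => l.set col (l.getD col 0 + f col)) l

-- B's inner pair fold splits into the column update and the row sum
theorem pv_inner_split (f : Nat → Int) (cs : List Nat) (l : List Int) (s : Int) :
    cs.foldl (fun (p : List Int × Int) col =>
        (p.1.set col (p.1.getD col 0 + f col), p.2 + f col)) (l, s)
      = (pvUpd f cs l, s + cs.foldl (fun a c => a + f c) 0) := by
  induction cs generalizing l s with
  | nil => simp [pvUpd]
  | cons x cs ih =>
    simp only [List.foldl_cons, pvUpd] at *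
    rw [ih, pv_foldl_add_shift _ _ (0 + f x)]
    ring_nf

theorem pv_upd_length (f : Nat → Int) (cs : List Nat) (l : List Int) :
    (pvUpd f cs l).length = l.length := by
  induction cs generalizing l with
  | nil => simp [pvUpd]
  | cons x cs ih => simp [pvUpd, List.foldl_cons] at *; rw [ih]; simp

theorem pv_upd_getD (f : Nat → Int) (cs : List Nat) (hnd : cs.Nodup) (l : List Int)
    (c : Nat) (hc : c < l.length) (hcs : ∀ x ∈ cs, x < l.length) :
    (pvUpd f cs l).getD c 0 = l.getD c 0 + (if c ∈ cs then f c else 0) := by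
  induction cs generalizing l with
  | nil => simp [pvUpd]
  | cons x cs ih =>
    have hx : x < l.length := hcs x (by simp)
    have hnd' := hnd
    simp only [List.nodup_cons] at hnd'
    have hlen : (l.set x (l.getD x 0 + f x)).length = l.length := by simp
    have step : pvUpd f (x :: cs) l = pvUpd f cs (l.set x (l.getD x 0 + f x)) := by
      simp [pvUpd, List.foldl_cons]
    rw [step, ih hnd'.2 _ (by omega) (by intro y hy; rw [hlen]; exact hcs y (by simp [hy]))]
    by_cases hcx : c = x
    · subst hcx
      simp [hnd'.1, List.getD, List.getElem?_set_self (by omega)]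
    · have : (l.set x (l.getD x 0 + f x)).getD c 0 = l.getD c 0 := by
        simp only [List.getD]
        rw [List.getElem?_set_ne (show x ≠ c by omega)]
      rw [this]
      by_cases hmem : c ∈ cs <;> simp [hmem, hcx]

-- a fold over a pair whose step acts componentwise splits into two folds
theorem pv_foldl_pair_split {alpha beta gamma : Type} (f : beta -> alpha -> beta)
    (g : gamma -> alpha -> gamma) (step : beta ×  gamma -> alpha -> beta ×  gamma)
    (hstep : ∀ b c a, step (b, c) a = (f b a, g c a)) :
    ∀ (xs : List alpha) (b : beta) (c : gamma),
      xs.foldl step (b, c) = (xs.foldl f b, xs.foldl g c) := by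
  intro xs
  induction xs with
  | nil => intro b c; rfl
  | cons x xs ih =>
    intro b c
    rw [List.foldl_cons, List.foldl_cons, List.foldl_cons, hstep]
    exact ih _ _

-- B's one-traversal fold splits into the column-sum table fold and A's row-max fold
theorem pv_outer_split (pixels : List (List Int)) (cols : Nat) (rs : List Nat)
    (l : List Int) (m : Int × Nat) :
    rs.foldl (fun (st : List Int × Int × Nat) row =>
        if ((List.range cols).foldl (fun (p : List Int × Int) col =>
              (p.1.set col (p.1.getD col 0 + (pixels.getD row []).getD col 0),
               p.2 + (pixels.getD row []).getD col 0)) (st.1, 0)).2 > st.2.1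
        then (((List.range cols).foldl (fun (p : List Int × Int) col =>
              (p.1.set col (p.1.getD col 0 + (pixels.getD row []).getD col 0),
               p.2 + (pixels.getD row []).getD col 0)) (st.1, 0)).1,
              ((List.range cols).foldl (fun (p : List Int × Int) col =>
              (p.1.set col (p.1.getD col 0 + (pixels.getD row []).getD col 0),
               p.2 + (pixels.getD row []).getD col 0)) (st.1, 0)).2, row)
        else (((List.range cols).foldl (fun (p : List Int × Int) col =>
              (p.1.set col (p.1.getD col 0 + (pixels.getD row []).getD col 0),
               p.2 + (pixels.getD row []).getD col 0)) (st.1, 0)).1, st.2.1, st.2.2)) (l, m)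
    = (rs.foldl (fun l row => pvUpd (fun col => (pixels.getD row []).getD col 0) (List.range cols) l) l,
       rs.foldl (fun (st : Int × Nat) row =>
          if (List.range cols).foldl (fun acc col => acc + (pixels.getD row []).getD col 0) 0 > st.1
          then ((List.range cols).foldl (fun acc col => acc + (pixels.getD row []).getD col 0) 0, row)
          else st) m) := by
  apply pv_foldl_pair_split
  intro b c a
  simp only [pv_inner_split, zero_add]
  split_ifs with h <;> simp

-- the table holds exactly A's column sums
theorem pv_colsums (pixels : List (List Int)) (cols : Nat) (rs : List Nat) (l : List Int)
    (hl : l.length = cols) (c : Nat) (hc : c < cols) :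
    (rs.foldl (fun l row => pvUpd (fun col => (pixels.getD row []).getD col 0) (List.range cols) l) l).getD c 0
      = l.getD c 0 + rs.foldl (fun a row => a + (pixels.getD row []).getD c 0) 0 := by
  induction rs generalizing l with
  | nil => simp
  | cons x rs ih =>
    simp only [List.foldl_cons]
    rw [ih _ (by rw [pv_upd_length]; exact hl),
        pv_upd_getD _ _ List.nodup_range l c (by omega)
          (by intro y hy; rw [hl]; exact List.mem_range.1 hy)]
    simp only [List.mem_range.2 hc, if_pos]
    rw [pv_foldl_add_shift _ rs (0 + (pixels.getD x []).getD c 0)]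
    ring

-- the second scan is insensitive to how the column sums are computed
theorem pv_cmax_congr (cs : List Nat) (g1 g2 : Nat → Int) (h : ∀ c ∈ cs, g1 c = g2 c)
    (st : Int × Nat) :
    cs.foldl (fun (st : Int × Nat) c => if g1 c > st.1 then (g1 c, c) else st) st
      = cs.foldl (fun (st : Int × Nat) c => if g2 c > st.1 then (g2 c, c) else st) st := by
  induction cs generalizing st with
  | nil => rfl
  | cons x cs ih =>
    simp only [List.foldl_cons, h x (by simp)]
    exact ih (fun c hc => h c (by simp [hc])) _

-- B's column scan equals A's column loop
theorem pv_cmax_eq (pixels : List (List Int)) (rows cols : Nat) :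
    (List.range cols).foldl (fun (st : Int × Nat) col =>
        if ((List.range rows).foldl (fun l row =>
              pvUpd (fun col => (pixels.getD row []).getD col 0) (List.range cols) l)
              (List.replicate cols 0)).getD col 0 > st.1
        then (((List.range rows).foldl (fun l row =>
              pvUpd (fun col => (pixels.getD row []).getD col 0) (List.range cols) l)
              (List.replicate cols 0)).getD col 0, col)
        else st) (0, 0)
      = (List.range cols).foldl (fun (st : Int × Nat) col =>
        if (List.range rows).foldl (fun acc row => acc + (pixels.getD row []).getD col 0) 0 > st.1
        then ((List.range rows).foldl (fun acc row => acc + (pixels.getD row []).getD col 0) 0, col)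
        else st) (0, 0) := by
  apply pv_cmax_congr
  intro c hc
  rw [pv_colsums pixels cols (List.range rows) _ (by simp) c (List.mem_range.1 hc)]
  simp [List.getD]

theorem pv_ports_eq (pixels : List (List Int)) :
    calculateGreyness pixels = calculateGreyness_alt pixels := by
  unfold calculateGreyness calculateGreyness_alt
  simp only [pv_outer_split, pv_cmax_eq]

-- ===== VERDICT (by name: the statement is the Claim_ definition above) =====
theorem calculateGreyness_spec : Claim_equal_calculateGreyness := by
  intro pixels _ _
  unfold Spec_calculateGreyness
  exact pv_ports_eq pixels
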